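-- pv_equiv track=rewrite | github.com/lshepard/advent-of-code | 2022/day07.py | directory_sizes
-- ===== SOURCE A (Python) =====
-- def directory_sizes(files):
--     # iterate through each file, adding its size to
--     # the total for all the directories it contains
--     dir_sizes = {}
--     for name, size in files.items():
--         # f like "/a/b/blah"
--         for d in directory_names(name):
--             if not d in dir_sizes:
--                 dir_sizes[d] = 0
--             dir_sizes[d] += size
--
--     return dir_sizes
--
-- def directory_names(file_name):
--     """All the directories that contain this file. let's do fully qualified"""
--
--     start = 0
--     dirs = []
--     while True:
--         i = file_name.find("/", start)
--         if i == -1: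
--             break
--         dirs.append(file_name[:i])
--         start = i+1
--     return dirs
-- ===== SOURCE B (Python) =====
-- def directory_sizes(files):
--     # Inverted aggregation: first list the distinct directories in order of
--     # first appearance, then compute each directory's total by scanning all
--     # files and summing those that lie under it (prefix test), instead of
--     # pushing each file's size up into every ancestor directory.
--     order = []
--     seen = set()
--     for name in files:
--         parts = name.split("/")
--         for i in range(1, len(parts)):
--             d = "/".join(parts[:i])
--             if d not in seen:
--                 seen.add(d)
--                 order.append(d)
--     return {d: sum(size for name, size in files.items()
--                    if name.startswith(d + "/"))
--             for d in order}
-- ===== Notes on version B (the rewrite author's own statement) =====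
-- stated objective: alternative
-- what changed: B inverts A's aggregation: instead of pushing each file's size up into every ancestor directory of its path, B first collects the distinct directory names in order of first appearance and then computes each directory's total independently by scanning all files and summing those under it with a startswith prefix test.
import Mathlib
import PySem

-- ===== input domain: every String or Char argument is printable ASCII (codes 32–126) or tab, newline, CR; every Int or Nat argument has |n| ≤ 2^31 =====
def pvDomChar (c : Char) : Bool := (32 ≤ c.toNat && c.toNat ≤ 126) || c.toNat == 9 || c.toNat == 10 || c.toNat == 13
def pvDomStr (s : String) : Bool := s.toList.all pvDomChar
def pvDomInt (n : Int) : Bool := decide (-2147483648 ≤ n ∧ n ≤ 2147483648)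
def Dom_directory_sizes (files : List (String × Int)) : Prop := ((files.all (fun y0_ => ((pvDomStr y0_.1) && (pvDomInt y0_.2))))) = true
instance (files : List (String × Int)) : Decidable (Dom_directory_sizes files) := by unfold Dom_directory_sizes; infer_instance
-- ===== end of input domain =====

-- B inverts A's aggregation: it first collects the distinct directory names in order of
-- first appearance, then computes each directory's total by scanning all files and summing
-- those under it (a startswith prefix test), instead of pushing each file's size up into
-- every ancestor directory (objective: alternative).

-- ===== PORT A =====
-- the 'while True: i = file_name.find("/", start) …' loop of directory_names;
-- fuel = len + 1 bounds the iterations (start grows by ≥ 1 per found slash)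
def dirNamesGo (cs : List Char) (start : Nat) (dirs : List String) (fuel : Nat) : List String :=
  match fuel with
  | 0 => dirs
  | fuel + 1 =>
    let i := PySem.Chars.findFrom cs ['/'] (start : Int) none
    if i = -1 then dirs
    else dirNamesGo cs (i.toNat + 1) (dirs ++ [String.ofList (cs.take i.toNat)]) fuel
      -- file_name[:i] with i ≥ 0 is take i (exact: i is a found index, hence 0 ≤ i)

def directory_names (file_name : String) : List String :=
  dirNamesGo file_name.toList 0 [] (file_name.toList.length + 1)

def directory_sizes (files : List (String × Int)) : List (String × Int) :=
  let dir_sizes :=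
    (PySem.Dict.ofList files).items.foldl (fun ds (p : String × Int) =>
      (directory_names p.1).foldl (fun ds d =>
        let ds := if ds.contains d then ds else ds.insert d 0
        ds.insert d (ds.getD d 0 + p.2)   -- dir_sizes[d] += size; d is present here, so getD = the stored value
        ) ds) PySem.Dict.empty
  dir_sizes.items

-- ===== PORT B =====
def directory_sizes_alt (files : List (String × Int)) : List (String × Int) :=
  let items := (PySem.Dict.ofList files).items
  -- pass 1: 'order'/'seen' — distinct directories in order of first appearance
  let st := items.foldl (fun (st : PySem.Set String × List String) p =>
      let parts := PySem.Chars.splitOn p.1.toList ['/']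
      (PySem.List.pyRange 1 (parts.length : Int) 1).foldl
        (fun (st : PySem.Set String × List String) i =>
          let d := String.ofList (List.intercalate ['/'] (parts.take i.toNat))
          if PySem.Set.contains st.1 d then st
          else (PySem.Set.add st.1 d, st.2 ++ [d])) st)
    ((PySem.Set.empty : PySem.Set String), ([] : List String))
  -- pass 2: each directory's total, scanning all files under it (name.startswith(d + "/"))
  st.2.map (fun d =>
    (d, items.foldl (fun s q =>
          if PySem.Chars.startswith q.1.toList (d.toList ++ ['/']) then s + q.2 else s) 0))

-- ===== PRECONDITION & SPEC =====
def Spec_directory_sizes (files : List (String × Int)) (out : List (String × Int)) : Prop := out = directory_sizes_alt files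
instance (files : List (String × Int)) (out : List (String × Int)) : Decidable (Spec_directory_sizes files out) := by unfold Spec_directory_sizes; infer_instance

-- ===== CLAIM (what is proved, stated in full; the proofs are below) =====
def Claim_equal_directory_sizes : Prop := ∀ (files : List (String × Int)), Dom_directory_sizes files → Spec_directory_sizes files (directory_sizes files)

-- ===== LEMMAS AND PROOFS =====

-- the common specification of "directories of a path": structural recursion on the characters
def specD : List Char → List (List Char)
  | [] => []
  | c :: cs => if c = '/' then [] :: (specD cs).map (fun t => '/' :: t)
               else (specD cs).map (fun t => c :: t)

-- per-file directory-key list, and the flat (directory, size) contribution list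
def fileKeys (p : String × Int) : List String := (specD p.1.toList).map String.ofList

def wsum (k : String) (L : List (String × Int)) : Int :=
  ((L.filter (fun q => q.1 == k)).map (·.2)).sum

-- the common normal form both ports are reduced to
def normalForm (files : List (String × Int)) : List (String × Int) :=
  let items := (PySem.Dict.ofList files).items
  (PySem.Set.ofList (items.flatMap fileKeys)).map (fun k =>
    (k, (items.map (fun q =>
          if PySem.Chars.startswith q.1.toList (k.toList ++ ['/']) then q.2 else 0)).sum))

-- ---- A-side: the find-loop computes specD ----

def findSlash : List Char → Option Nat
  | [] => none
  | c :: cs => if c = '/' then some 0 else (findSlash cs).map (· + 1)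

theorem findSlash_lt {cs : List Char} {j : Nat} (h : findSlash cs = some j) : j < cs.length := by
  induction cs generalizing j with
  | nil => simp [findSlash] at h
  | cons c cs ih =>
    by_cases hc : c = '/'
    · simp [findSlash, hc] at h; subst h; simp
    · simp [findSlash, hc] at h
      obtain ⟨k, hk, rfl⟩ := h
      have := ih hk; simp; omega

theorem findSlash_drop {cs : List Char} {j : Nat} (h : findSlash cs = some j) :
    cs.drop j = '/' :: cs.drop (j + 1) := by
  induction cs generalizing j with
  | nil => simp [findSlash] at h
  | cons c cs ih =>
    by_cases hc : c = '/'
    · simp [findSlash, hc] at h; subst h; simp [hc]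
    · simp [findSlash, hc] at h
      obtain ⟨k, hk, rfl⟩ := h
      simpa using ih hk

theorem find_go_eq (cs : List Char) (k : Nat) :
    PySem.Chars.find.go ['/'] cs k =
      match findSlash cs with
      | none => -1
      | some j => (k : Int) + j := by
  induction cs generalizing k with
  | nil => simp [PySem.Chars.find.go, findSlash, List.isEmpty]
  | cons c cs ih =>
    by_cases hc : c = '/'
    · simp [PySem.Chars.find.go, findSlash, hc, List.isPrefixOf]
    · have hpre : List.isPrefixOf ['/'] (c :: cs) = false := by
        simp [List.isPrefixOf]; intro h; exact absurd h.symm hc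
      rw [PySem.Chars.find.go]
      simp only [hpre, Bool.false_eq_true, if_false]
      rw [ih (k + 1)]
      simp only [findSlash, hc, if_false]
      cases hfs : findSlash cs with
      | none => simp
      | some j => simp; ring

theorem find_eq (cs : List Char) :
    PySem.Chars.find cs ['/'] =
      match findSlash cs with
      | none => -1
      | some j => (j : Int) := by
  have := find_go_eq cs 0
  simp only [PySem.Chars.find] at *
  rw [this]
  cases findSlash cs <;> simp

theorem specD_of_none {cs : List Char} (h : findSlash cs = none) : specD cs = [] := by
  induction cs with
  | nil => simp [specD]
  | cons c cs ih =>
    by_cases hc : c = '/'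
    · simp [findSlash, hc] at h
    · simp [findSlash, hc] at h
      simp [specD, hc, ih h]

theorem specD_of_some {cs : List Char} {j : Nat} (h : findSlash cs = some j) :
    specD cs = cs.take j :: (specD (cs.drop (j + 1))).map (fun t => cs.take j ++ '/' :: t) := by
  induction cs generalizing j with
  | nil => simp [findSlash] at h
  | cons c cs ih =>
    by_cases hc : c = '/'
    · simp [findSlash, hc] at h; subst h; simp [specD, hc]
    · simp [findSlash, hc] at h
      obtain ⟨k, hk, rfl⟩ := h
      simp only [specD, hc, if_false, ih hk]
      simp [List.map_map, Function.comp]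

theorem dirNamesGo_eq (fuel : Nat) :
    ∀ (cs : List Char) (start : Nat) (dirs : List String),
      start ≤ cs.length → cs.length - start < fuel →
      dirNamesGo cs start dirs fuel =
        dirs ++ (specD (cs.drop start)).map (fun t => String.ofList (cs.take start ++ t)) := by
  induction fuel with
  | zero => intro cs start dirs h1 h2; omega
  | succ fuel ih =>
    intro cs start dirs h1 h2
    rw [dirNamesGo]
    rw [PySem.Chars.findFrom_natCast cs ['/'] start h1, find_eq]
    cases hfs : findSlash (cs.drop start) with
    | none =>
      simp [specD_of_none hfs]
    | some j =>
      have hj : j < cs.length - start := by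
        have := findSlash_lt hfs; simpa using this
      have hne : (start : Int) + j ≠ -1 := by omega
      have htn : ((start : Int) + j).toNat = start + j := by omega
      have hslash : cs.drop (start + j) = '/' :: cs.drop (start + j + 1) := by
        have h := findSlash_drop hfs
        simp only [List.drop_drop] at h
        rw [Nat.add_assoc]
        exact h
      rw [if_neg (by omega : ¬ ((j : Int) = -1)), if_neg hne, htn]
      rw [ih cs (start + j + 1) _ (by omega) (by omega)]
      rw [specD_of_some hfs]
      have htake : cs.take (start + j) = cs.take start ++ (cs.drop start).take j := List.take_add
      have htake1 : cs.take (start + j + 1) = cs.take (start + j) ++ ['/'] := by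
        rw [List.take_add (i := start + j) (j := 1)]
        simp [hslash]
      have hdd : (cs.drop start).drop (j + 1) = cs.drop (start + j + 1) := by
        rw [List.drop_drop, Nat.add_assoc]
      have hmap : List.map (fun t => String.ofList (cs.take (start + j + 1) ++ t))
            (specD (cs.drop (start + j + 1))) =
          List.map ((fun t => String.ofList (cs.take start ++ t)) ∘
              fun t => (cs.drop start).take j ++ '/' :: t)
            (specD (cs.drop (start + j + 1))) := by
        apply List.map_congr_left
        intro t _
        simp [Function.comp, htake1, htake, List.append_assoc]
      rw [List.map_cons, List.map_map, hdd, List.append_assoc, List.singleton_append, htake, hmap]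

theorem directory_names_eq (s : String) :
    directory_names s = (specD s.toList).map (fun t => String.ofList t) := by
  unfold directory_names
  rw [dirNamesGo_eq (s.toList.length + 1) s.toList 0 [] (by omega) (by omega)]
  simp

-- A's contains-guard-then-add step is the plain insert-add step
theorem step_eq (ds : PySem.Dict String Int) (d : String) (v : Int) :
    (let t := if ds.contains d then ds else ds.insert d 0
     t.insert d (t.getD d 0 + v)) = ds.insert d (ds.getD d 0 + v) := by
  by_cases h : ds.contains d
  · simp [h]
  · simp only [Bool.not_eq_true] at h
    simp only [h, Bool.false_eq_true, if_false]
    rw [PySem.Dict.insert_insert_self]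
    unfold PySem.Dict.getD
    rw [PySem.Dict.get?_insert_self, (PySem.Dict.get?_eq_none_iff_contains ds d).mpr h]
    simp

-- ---- shared facts about specD ----

theorem specD_mem_iff (cs : List Char) : ∀ t, t ∈ specD cs ↔ (t ++ ['/']) <+: cs := by
  induction cs with
  | nil =>
    intro t
    simp only [specD, List.not_mem_nil, false_iff]
    intro h
    have := h.length_le
    simp at this
  | cons c cs ih =>
    intro t
    by_cases hc : c = '/'
    · subst hc
      cases t with
      | nil => simp [specD, List.cons_prefix_cons]
      | cons a t =>
        simp [specD, List.mem_map, List.cons_prefix_cons, List.cons.injEq, ih, eq_comm,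
          and_comm]
    · cases t with
      | nil =>
        simp only [specD, if_neg hc, List.mem_map, List.nil_append]
        constructor
        · rintro ⟨u, _, heq⟩
          exact absurd heq (by simp)
        · intro h
          rw [List.cons_prefix_cons] at h
          exact absurd h.1.symm hc
      | cons a t =>
        simp only [specD, if_neg hc, List.mem_map, List.cons_append, List.cons_prefix_cons]
        constructor
        · rintro ⟨u, hu, heq⟩
          injection heq with h1 h2
          subst h1; subst h2
          exact ⟨rfl, (ih u).mp hu⟩
        · rintro ⟨rfl, h⟩
          exact ⟨t, (ih t).mpr h, rfl⟩

theorem specD_pairwise (cs : List Char) :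
    (specD cs).Pairwise (fun a b => a.length < b.length) := by
  induction cs with
  | nil => simp [specD]
  | cons c cs ih =>
    by_cases hc : c = '/'
    · simp only [specD, hc, if_true]
      refine List.Pairwise.cons ?_ ?_
      · intro t ht
        simp only [List.mem_map] at ht
        obtain ⟨u, _, rfl⟩ := ht
        simp
      · rw [List.pairwise_map]
        exact ih.imp (by intro a b h; simpa using h)
    · simp only [specD, hc, if_false]
      rw [List.pairwise_map]
      exact ih.imp (by intro a b h; simpa using h)

theorem specD_nodup (cs : List Char) : (specD cs).Nodup := by
  exact (specD_pairwise cs).imp (by intro a b h hab; subst hab; omega)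

theorem ofList_injective : Function.Injective String.ofList := by
  intro a b h
  have := congrArg String.toList h
  simpa using this

theorem count_fileKeys (p : String × Int) (k : String) :
    (fileKeys p).count k =
      if PySem.Chars.startswith p.1.toList (k.toList ++ ['/']) then 1 else 0 := by
  unfold fileKeys
  have hk : k = String.ofList k.toList := by simp
  rw [hk, List.count_map_of_injective _ _ ofList_injective]
  by_cases h : (k.toList ++ ['/']) <+: p.1.toList
  · rw [if_pos (by rw [PySem.Chars.startswith_iff]; simpa using h)]
    exact List.count_eq_one_of_mem (specD_nodup _) ((specD_mem_iff _ _).mpr (by simpa using h))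
  · rw [if_neg (by rw [PySem.Chars.startswith_iff]; simpa using h)]
    exact List.count_eq_zero_of_not_mem (fun hm => h (by simpa using (specD_mem_iff _ _).mp hm))

-- ---- wsum: the weighted sum behind the insert-add fold ----

theorem wsum_append (k : String) (L M : List (String × Int)) :
    wsum k (L ++ M) = wsum k L + wsum k M := by
  simp [wsum, List.filter_append]

theorem wsum_file (k : String) (p : String × Int) :
    wsum k ((fileKeys p).map (fun d => (d, p.2))) =
      if PySem.Chars.startswith p.1.toList (k.toList ++ ['/']) then p.2 else 0 := by
  unfold wsum
  rw [List.filter_map, List.map_map]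
  have h1 : ((fun (q : String × Int) => q.1 == k) ∘ (fun d => (d, p.2))) = fun d => d == k := rfl
  have h2 : ((fun (q : String × Int) => q.2) ∘ (fun d => (d, p.2))) = fun _ => p.2 := rfl
  rw [h1, h2, PySem.List.sum_map_const_int]
  have hlen : ((fileKeys p).filter (fun d => d == k)).length = (fileKeys p).count k := by
    rw [List.count_eq_countP, List.countP_eq_length_filter]
  rw [hlen, count_fileKeys]
  split_ifs <;> simp

theorem wsum_flatMap (k : String) (ls : List (String × Int)) :
    wsum k (ls.flatMap (fun p => (fileKeys p).map (fun d => (d, p.2)))) =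
      (ls.map (fun q =>
        if PySem.Chars.startswith q.1.toList (k.toList ++ ['/']) then q.2 else 0)).sum := by
  induction ls with
  | nil => simp [wsum]
  | cons p ls ih =>
    rw [List.flatMap_cons, wsum_append, wsum_file, ih, List.map_cons, List.sum_cons]

theorem getD_insAddFold (L : List (String × Int)) :
    ∀ (d : PySem.Dict String Int) (k : String),
      (L.foldl (fun ds q => ds.insert q.1 (ds.getD q.1 0 + q.2)) d).getD k 0 =
        d.getD k 0 + wsum k L := by
  induction L with
  | nil => intro d k; simp [wsum]
  | cons q L ih =>
    intro d k
    rw [List.foldl_cons, ih, PySem.Dict.getD_insert]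
    have hw : wsum k (q :: L) = (if q.1 == k then q.2 else 0) + wsum k L := by
      simp only [wsum, List.filter_cons]
      split_ifs <;> simp
    rw [hw]
    by_cases h : k = q.1
    · subst h; simp; ring
    · rw [if_neg h, if_neg (by simpa using Ne.symm h)]; ring

-- ---- A reduced to the normal form ----

theorem A_norm (files : List (String × Int)) : directory_sizes files = normalForm files := by
  unfold directory_sizes normalForm
  simp only
  have hfun : (fun (ds : PySem.Dict String Int) (p : String × Int) =>
        List.foldl (fun ds d =>
            (if ds.contains d = true then ds else ds.insert d 0).insert d
              ((if ds.contains d = true then ds else ds.insert d 0).getD d 0 + p.2))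
          ds (directory_names p.1)) =
      (fun ds (p : String × Int) =>
        List.foldl (fun ds q => ds.insert q.1 (ds.getD q.1 0 + q.2)) ds
          ((fileKeys p).map (fun d => (d, p.2)))) := by
    funext ds p
    rw [List.foldl_map, directory_names_eq]
    unfold fileKeys
    congr 1
    funext t d
    have h := step_eq t d p.2
    simpa using h
  rw [hfun, ← List.foldl_flatMap]
  set items := (PySem.Dict.ofList files).items with hitems
  set contribs := items.flatMap (fun p => (fileKeys p).map (fun d => (d, p.2))) with hcontribs
  have hnodup : (contribs.foldl (fun ds q => ds.insert q.1 (ds.getD q.1 0 + q.2))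
      PySem.Dict.empty).keys.Nodup :=
    PySem.Dict.nodup_keys_foldl_insert_key contribs Prod.fst
      (fun ds q => ds.getD q.1 0 + q.2) PySem.Dict.empty PySem.Dict.nodup_keys_empty
  have hkeys : (contribs.foldl (fun ds q => ds.insert q.1 (ds.getD q.1 0 + q.2))
      PySem.Dict.empty).keys = PySem.Set.ofList (items.flatMap fileKeys) := by
    have h := PySem.Dict.keys_foldl_insert_key contribs Prod.fst
      (fun ds q => ds.getD q.1 0 + q.2) PySem.Dict.empty
    rw [h]
    have hmap : contribs.map Prod.fst = items.flatMap fileKeys := by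
      rw [hcontribs, List.map_flatMap]
      congr 1
      funext p
      rw [List.map_map]
      have hid : (Prod.fst ∘ fun d : String => (d, p.2)) = id := rfl
      rw [hid, List.map_id]
    rw [hmap, PySem.Set.ofList_eq_foldl]
    rfl
  rw [PySem.Dict.items_eq_map_keys _ hnodup 0, hkeys]
  apply List.map_congr_left
  intro k _
  rw [getD_insAddFold, hcontribs, wsum_flatMap]
  simp

-- ---- B-side: split + join prefixes are specD, and the pair fold is a Set fold ----

def pySplit : List Char → List (List Char)
  | [] => [[]]
  | c :: cs =>
      if c = '/' then [] :: pySplit cs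
      else match pySplit cs with
           | [] => [[c]]   -- unreachable
           | p :: ps => (c :: p) :: ps

theorem pySplit_ne_nil (cs : List Char) : pySplit cs ≠ [] := by
  induction cs with
  | nil => simp [pySplit]
  | cons c cs ih =>
    by_cases hc : c = '/'
    · simp [pySplit, hc]
    · simp only [pySplit, hc, if_false]
      cases h : pySplit cs <;> simp

theorem splitOn_go_eq (cs : List Char) :
    ∀ (fuel : Nat) (cur : List Char) (acc : List (List Char)), cs.length < fuel →
      PySem.Chars.splitOn.go ['/'] fuel cs cur acc =
        acc.reverse ++ (match pySplit cs with
                        | [] => [cur.reverse]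
                        | p :: ps => (cur.reverse ++ p) :: ps) := by
  induction cs with
  | nil =>
    intro fuel cur acc hf
    cases fuel with
    | zero => omega
    | succ f =>
      rw [PySem.Chars.splitOn.go]
      · simp [pySplit]
      · omega
  | cons c cs ih =>
    intro fuel cur acc hf
    cases fuel with
    | zero => omega
    | succ f =>
      rw [PySem.Chars.splitOn.go]
      by_cases hc : c = '/'
      · have hpre : List.isPrefixOf ['/'] (c :: cs) = true := by
          simp [List.isPrefixOf, hc]
        simp only [hpre, if_true]
        have := ih f [] (cur.reverse :: acc) (by simpa using Nat.lt_of_succ_lt_succ hf)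
        simp only [List.length_singleton, List.drop_one, List.tail_cons]
        rw [this]
        cases hps : pySplit cs with
        | nil => exact absurd hps (pySplit_ne_nil cs)
        | cons p ps => simp [pySplit, hc, hps]
      · have hpre : List.isPrefixOf ['/'] (c :: cs) = false := by
          simp [List.isPrefixOf]; intro h; exact absurd h.symm hc
        simp only [hpre, Bool.false_eq_true, if_false]
        rw [ih f (c :: cur) acc (by simpa using Nat.lt_of_succ_lt_succ hf)]
        cases hps : pySplit cs with
        | nil => exact absurd hps (pySplit_ne_nil cs)
        | cons p ps => simp [pySplit, hc, hps]

theorem splitOn_eq (cs : List Char) : PySem.Chars.splitOn cs ['/'] = pySplit cs := by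
  unfold PySem.Chars.splitOn
  rw [splitOn_go_eq cs (cs.length + 1) [] [] (by omega)]
  cases hps : pySplit cs with
  | nil => exact absurd hps (pySplit_ne_nil cs)
  | cons p ps => simp

-- running prefixes of the split parts
def prefixLoop (pre : List Char) (parts : List (List Char)) : List (List Char) :=
  match parts with
  | [] => []
  | p :: ps => pre :: prefixLoop (pre ++ '/' :: p) ps

theorem prefixLoop_cons (q p : List Char) (ps : List (List Char)) :
    prefixLoop q (p :: ps) = q :: (prefixLoop p ps).map (fun t => q ++ '/' :: t) := by
  induction ps generalizing q p with
  | nil => simp [prefixLoop]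
  | cons r ps ih =>
    have h1 : prefixLoop q (p :: r :: ps) = q :: prefixLoop (q ++ '/' :: p) (r :: ps) := rfl
    rw [h1, ih (q ++ '/' :: p) r, ih p r]
    simp [List.map_map, Function.comp, List.append_assoc]

theorem prefixLoop_cons_map (c : Char) (p : List Char) (ps : List (List Char)) :
    prefixLoop (c :: p) ps = (prefixLoop p ps).map (fun t => c :: t) := by
  induction ps generalizing p with
  | nil => simp [prefixLoop]
  | cons r ps ih =>
    have h1 : prefixLoop (c :: p) (r :: ps) = (c :: p) :: prefixLoop (c :: (p ++ '/' :: r)) ps := rfl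
    have h2 : prefixLoop p (r :: ps) = p :: prefixLoop (p ++ '/' :: r) ps := rfl
    rw [h1, h2, ih (p ++ '/' :: r)]
    simp

theorem pySplit_prefixLoop (l : List Char) :
    (match pySplit l with
     | [] => []
     | p :: ps => prefixLoop p ps) = specD l := by
  induction l with
  | nil => simp [pySplit, prefixLoop, specD]
  | cons c l ih =>
    cases hps : pySplit l with
    | nil => exact absurd hps (pySplit_ne_nil l)
    | cons p ps =>
      rw [hps] at ih
      by_cases hc : c = '/'
      · simp only [pySplit, hc, if_true, hps]
        rw [prefixLoop_cons]
        simp only [specD, if_true]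
        rw [← ih]
        simp
      · simp only [pySplit, hc, if_false, hps]
        rw [prefixLoop_cons_map]
        simp only [specD, hc, if_false]
        rw [← ih]

-- "/".join of a parts prefix
theorem intercalate_cons_cons (a b : List Char) (l : List (List Char)) :
    List.intercalate ['/'] (a :: b :: l) = a ++ '/' :: List.intercalate ['/'] (b :: l) := by
  simp [List.intercalate, List.intersperse]

theorem intercalate_shift (p r : List Char) (l : List (List Char)) :
    List.intercalate ['/'] ((p ++ '/' :: r) :: l) =
      p ++ '/' :: List.intercalate ['/'] (r :: l) := by
  cases l with
  | nil => simp [List.intercalate]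
  | cons c l => rw [intercalate_cons_cons, intercalate_cons_cons]; simp

theorem range_joins (ps : List (List Char)) :
    ∀ p, (List.range ps.length).map
        (fun j => List.intercalate ['/'] ((p :: ps).take (j + 1))) = prefixLoop p ps := by
  induction ps with
  | nil => intro p; simp [prefixLoop]
  | cons r rs ih =>
    intro p
    rw [List.length_cons, List.range_succ_eq_map, List.map_cons, List.map_map]
    have h0 : List.intercalate ['/'] ((p :: r :: rs).take (0 + 1)) = p := by
      simp [List.intercalate]
    rw [h0]
    have hcomp : ((fun j => List.intercalate ['/'] ((p :: r :: rs).take (j + 1))) ∘ Nat.succ) =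
        fun j => List.intercalate ['/'] (((p ++ '/' :: r) :: rs).take (j + 1)) := by
      funext j
      simp only [Function.comp]
      cases hj : rs.take j with
      | nil =>
        simp only [Nat.succ_eq_add_one, List.take_succ_cons, hj]
        rw [intercalate_shift]
        exact intercalate_cons_cons p r _
      | cons x xs =>
        simp only [Nat.succ_eq_add_one, List.take_succ_cons, hj]
        rw [intercalate_shift]
        exact intercalate_cons_cons p r _
    rw [hcomp, ih (p ++ '/' :: r)]
    rfl

-- the per-file joined prefixes are exactly fileKeys
theorem joins_eq_fileKeys (p : String × Int) :
    (PySem.List.pyRange 1 ((PySem.Chars.splitOn p.1.toList ['/']).length : Int) 1).map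
        (fun i => String.ofList (List.intercalate ['/']
          ((PySem.Chars.splitOn p.1.toList ['/']).take i.toNat))) = fileKeys p := by
  unfold fileKeys
  rw [splitOn_eq]
  cases hps : pySplit p.1.toList with
  | nil => exact absurd hps (pySplit_ne_nil _)
  | cons p0 ps =>
    have hspec2 : prefixLoop p0 ps = specD p.1.toList := by
      have h := pySplit_prefixLoop p.1.toList
      rw [hps] at h
      exact h
    rw [← hspec2, ← range_joins ps p0]
    rw [PySem.List.pyRange_one, List.map_map, List.map_map]
    have hlen : ((((p0 :: ps).length : Nat) : Int) - 1).toNat = ps.length := by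
      simp only [List.length_cons]; omega
    rw [hlen]
    apply List.map_congr_left
    intro j _
    simp only [Function.comp]
    have hj : ((1 : Int) + (j : Nat)).toNat = j + 1 := by omega
    rw [hj]

-- the guarded pair step keeps seen = order, and both equal a Set.add fold
theorem pairFold (ks : List String) :
    ∀ s : PySem.Set String,
      (ks.foldl (fun (st : PySem.Set String × List String) d =>
          if PySem.Set.contains st.1 d then st
          else (PySem.Set.add st.1 d, st.2 ++ [d])) (s, s)) =
        (ks.foldl PySem.Set.add s, ks.foldl PySem.Set.add s) := by
  induction ks with
  | nil => intro s; rfl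
  | cons d ks ih =>
    intro s
    by_cases h : PySem.Set.contains s d
    · have hadd : PySem.Set.add s d = s := by
        simp only [PySem.Set.add, h, if_true]
      simp only [List.foldl_cons, h, if_true, hadd]
      exact ih s
    · have h' : PySem.Set.contains s d = false := by simpa using h
      have hadd : PySem.Set.add s d = s ++ [d] := by
        simp only [PySem.Set.add, h', Bool.false_eq_true, if_false]
      simp only [List.foldl_cons, h, Bool.false_eq_true, if_false, hadd]
      exact ih (s ++ [d])

theorem outer_diag (ls : List (String × Int)) :
    ∀ s : PySem.Set String,
      ls.foldl (fun st p => (fileKeys p).foldl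
          (fun (st : PySem.Set String × List String) d =>
            if PySem.Set.contains st.1 d then st
            else (PySem.Set.add st.1 d, st.2 ++ [d])) st) (s, s) =
        (ls.foldl (fun s p => (fileKeys p).foldl PySem.Set.add s) s,
         ls.foldl (fun s p => (fileKeys p).foldl PySem.Set.add s) s) := by
  induction ls with
  | nil => intro s; rfl
  | cons p ls ih =>
    intro s
    simp only [List.foldl_cons, pairFold]
    exact ih _

theorem B_norm (files : List (String × Int)) : directory_sizes_alt files = normalForm files := by
  unfold directory_sizes_alt normalForm
  simp only
  have hinner : (fun (st : PySem.Set String × List String) (p : String × Int) =>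
      (PySem.List.pyRange 1 ((PySem.Chars.splitOn p.1.toList ['/']).length : Int) 1).foldl
        (fun (st : PySem.Set String × List String) i =>
          if PySem.Set.contains st.1
              (String.ofList (List.intercalate ['/']
                ((PySem.Chars.splitOn p.1.toList ['/']).take i.toNat))) then st
          else (PySem.Set.add st.1
                  (String.ofList (List.intercalate ['/']
                    ((PySem.Chars.splitOn p.1.toList ['/']).take i.toNat))),
                st.2 ++ [String.ofList (List.intercalate ['/']
                    ((PySem.Chars.splitOn p.1.toList ['/']).take i.toNat))])) st) =
      fun st p => (fileKeys p).foldl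
          (fun (st : PySem.Set String × List String) d =>
            if PySem.Set.contains st.1 d then st
            else (PySem.Set.add st.1 d, st.2 ++ [d])) st := by
    funext st p
    rw [← joins_eq_fileKeys p, List.foldl_map]
  rw [hinner]
  have hdiag := outer_diag (PySem.Dict.ofList files).items ([] : PySem.Set String)
  rw [show ((PySem.Set.empty : PySem.Set String), ([] : List String)) =
      ((([] : PySem.Set String)), ([] : List String)) from rfl]
  rw [hdiag]
  have hX : (PySem.Dict.ofList files).items.foldl
      (fun s p => (fileKeys p).foldl PySem.Set.add s) ([] : PySem.Set String) =
      PySem.Set.ofList ((PySem.Dict.ofList files).items.flatMap fileKeys) := by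
    rw [PySem.Set.ofList_eq_foldl, List.foldl_flatMap]
  rw [hX]
  apply List.map_congr_left
  intro d _
  have hbody : (fun (s : Int) (q : String × Int) =>
      if PySem.Chars.startswith q.1.toList (d.toList ++ ['/']) then s + q.2 else s) =
      fun s q => s + (if PySem.Chars.startswith q.1.toList (d.toList ++ ['/']) then q.2 else 0) := by
    funext s q; split_ifs <;> simp
  rw [hbody, PySem.List.foldl_add]
  simp

-- ===== VERDICT (by name: the statement is the Claim_ definition above) =====
theorem directory_sizes_spec : Claim_equal_directory_sizes := by
  intro files _
  unfold Spec_directory_sizes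
  rw [A_norm, B_norm]
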